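-- pv_equiv track=rewrite | github.com/adi8837/10_March_FSDS | Python_Asnwer3.py | door_mat_dim
-- ===== SOURCE A (Python) =====
-- def door_mat_dim(N):
--   if N % 2 == 0:
--     return "N must be an odd number."
--   M = 3 * N
--   pattern = [('.|.' * (2 * i + 1)).center(M, '-') for i in range(N // 2)]
--   welcome_line = 'WELCOME'.center(M, '-')
--   pattern.append(welcome_line)
--
--   # Create the mirrored pattern without the welcome message
--   mirrored_pattern = pattern[::-1][1:]  # Excluding the first element (welcome line)
--
--   pattern += mirrored_pattern
--   return '\n'.join(pattern)
-- ===== SOURCE B (Python) =====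
-- def door_mat_dim(N):
--     if N % 2 == 0:
--         return "N must be an odd number."
--     M = 3 * N
--     return '\n'.join(
--         'WELCOME'.center(M, '-') if r == N // 2
--         else ('.|.' * (2 * min(r, N - 1 - r) + 1)).center(M, '-')
--         for r in range(N)
--     )
-- ===== Notes on version B (the rewrite author's own statement) =====
-- stated objective: simpler
-- what changed: B emits every row in one pass over range(N), computing each row directly from its distance to the centre, instead of A's build-top-half, append-welcome, reverse-and-concatenate approach.
-- intended difference: For negative odd N, A returns the bare string 'WELCOME' (empty top half plus the unpadded welcome line, an artefact of its append step), while B returns '' (no rows), the natural value for a non-positive dimension. — e.g. on door_mat_dim(-1): A returns "WELCOME", B returns ""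
import Mathlib
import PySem

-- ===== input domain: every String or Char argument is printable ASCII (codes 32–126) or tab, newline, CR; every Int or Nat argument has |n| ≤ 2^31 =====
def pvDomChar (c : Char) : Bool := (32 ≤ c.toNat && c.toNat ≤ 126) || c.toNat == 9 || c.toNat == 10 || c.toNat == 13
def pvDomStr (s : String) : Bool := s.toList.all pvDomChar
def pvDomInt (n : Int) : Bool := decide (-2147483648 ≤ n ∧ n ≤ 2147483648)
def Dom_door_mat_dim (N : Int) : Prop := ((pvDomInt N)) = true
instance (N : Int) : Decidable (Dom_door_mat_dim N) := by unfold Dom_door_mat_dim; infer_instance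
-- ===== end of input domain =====

-- B emits every row in one pass over range(N), computing each row directly from its
-- distance to the centre, instead of A's build-top-half / append-welcome /
-- mirror-and-concatenate decomposition.

-- shared helper: hand port of Python's str.center(width, fill) — exact: CPython returns s
-- unchanged when width ≤ len(s), else puts the extra fill char left iff (marg & width & 1) == 1
def pyCenter (s : List Char) (w : Int) (f : Char) : List Char :=
  if w ≤ (s.length : Int) then s
  else
    let mn := (w - (s.length : Int)).toNat
    let left := mn / 2 + (mn &&& w.toNat &&& 1)
    List.replicate left f ++ s ++ List.replicate (mn - left) f

-- ===== PORT A =====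
def door_mat_dim (N : Int) : String :=
  if PySem.Int.mod N 2 == 0 then "N must be an odd number."
  else
    let M := 3 * N
    let pattern := (PySem.List.pyRange 0 (PySem.Int.floordiv N 2) 1).map
      (fun i => pyCenter (PySem.List.pyRepeat ".|.".toList (2 * i + 1)) M '-')
    let welcome_line := pyCenter "WELCOME".toList M '-'
    let pattern := pattern ++ [welcome_line]
    -- mirrored = pattern[::-1][1:]
    let mirrored := PySem.List.slice ((PySem.List.slice? pattern none none (-1)).getD []) (some 1) none
    let pattern := pattern ++ mirrored
    String.ofList (PySem.Chars.join "\n".toList pattern)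

-- ===== PORT B =====
def door_mat_dim_alt (N : Int) : String :=
  if PySem.Int.mod N 2 == 0 then "N must be an odd number."
  else
    let M := 3 * N
    let lines := (PySem.List.pyRange 0 N 1).map
      (fun r =>
        if r == PySem.Int.floordiv N 2 then pyCenter "WELCOME".toList M '-'
        else pyCenter (PySem.List.pyRepeat ".|.".toList (2 * (min r (N - 1 - r)) + 1)) M '-')
    String.ofList (PySem.Chars.join "\n".toList lines)

-- ===== PRECONDITION & SPEC =====
-- For negative odd N, A returns the bare string "WELCOME" (empty top half plus the
-- unpadded welcome line, an artefact of its append step), while B returns "" (no rows),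
-- the natural value for a non-positive dimension.
def D_door_mat_dim (N : Int) : Prop := N < 0 ∧ N % 2 = 1
instance (N : Int) : Decidable (D_door_mat_dim N) := by unfold D_door_mat_dim; infer_instance

def Spec_door_mat_dim (N : Int) (out : String) : Prop := ¬ D_door_mat_dim N → out = door_mat_dim_alt N
instance (N : Int) (out : String) : Decidable (Spec_door_mat_dim N out) := by unfold Spec_door_mat_dim; infer_instance

def pvDiffWitness_door_mat_dim : Int := (-1)
def pvDiffWitnessOut_door_mat_dim : String × String := ("WELCOME", "")

-- ===== CLAIM (what is proved, stated in full; the proofs are below) =====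
def Claim_unchanged_door_mat_dim : Prop := ∀ (N : Int), Dom_door_mat_dim N → Spec_door_mat_dim N (door_mat_dim N)
def Claim_changed_door_mat_dim : Prop := Dom_door_mat_dim (pvDiffWitness_door_mat_dim) ∧ D_door_mat_dim (pvDiffWitness_door_mat_dim) ∧ door_mat_dim (pvDiffWitness_door_mat_dim) = pvDiffWitnessOut_door_mat_dim.1 ∧ door_mat_dim_alt (pvDiffWitness_door_mat_dim) = pvDiffWitnessOut_door_mat_dim.2 ∧ pvDiffWitnessOut_door_mat_dim.1 ≠ pvDiffWitnessOut_door_mat_dim.2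
def Claim_exact_door_mat_dim : Prop := ∀ (N : Int), Dom_door_mat_dim N → D_door_mat_dim N → door_mat_dim N ≠ door_mat_dim_alt N

-- ===== LEMMAS AND PROOFS =====

-- B's single pass over range(2h+1) produces A's top-half ++ welcome ++ mirror, abstractly.
theorem mat_lines {α : Type} (f : Int → α) (w : α) (h : Int) (hh : 0 ≤ h) :
    (PySem.List.pyRange 0 (2*h+1) 1).map
        (fun r => if r = h then w else f (min r (2*h+1 - 1 - r))) =
      ((PySem.List.pyRange 0 h 1).map f ++ [w]) ++
        (((PySem.List.pyRange 0 h 1).map f ++ [w]).reverse).tail := by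
  have hsplit1 : PySem.List.pyRange 0 (2*h+1) 1
      = PySem.List.pyRange 0 h 1 ++ PySem.List.pyRange h (2*h+1) 1 :=
    PySem.List.pyRange_one_append 0 h (2*h+1) hh (by omega)
  have hsplit2 : PySem.List.pyRange h (2*h+1) 1
      = PySem.List.pyRange h (h+1) 1 ++ PySem.List.pyRange (h+1) (2*h+1) 1 :=
    PySem.List.pyRange_one_append h (h+1) (2*h+1) (by omega) (by omega)
  have htail : ((PySem.List.pyRange 0 h 1).map f ++ [w]).reverse.tail
      = ((PySem.List.pyRange 0 h 1).map f).reverse := by simp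
  rw [hsplit1, hsplit2, PySem.List.pyRange_one_singleton, htail, List.singleton_append,
    List.map_append, List.map_cons, List.append_assoc, List.singleton_append]
  congr 1
  · -- top half: r < h, the centre test is false and min picks r
    apply List.map_congr_left
    intro r hr
    rw [PySem.List.mem_pyRange_one] at hr
    rw [if_neg (by omega), min_eq_left (by omega)]
  congr 1
  · -- centre row
    simp
  · -- bottom half is the reversed top half
    apply List.ext_getElem
    · simp only [List.length_map, List.length_reverse, PySem.List.length_pyRange_one]
      omega
    · intro i hi1 hi2
      simp only [List.getElem_map, PySem.List.getElem_pyRange_one, List.getElem_reverse,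
        List.length_map, PySem.List.length_pyRange_one] at *
      rw [if_neg (by omega), min_eq_right (by omega)]
      congr 1
      simp only [List.length_map, List.length_reverse, PySem.List.length_pyRange_one] at hi1 hi2
      omega

-- ===== VERDICT (by name: the statement is the Claim_ definition above) =====
theorem door_mat_dim_spec : Claim_unchanged_door_mat_dim := by
  intro N _ hD
  show door_mat_dim N = door_mat_dim_alt N
  have hmod : PySem.Int.mod N 2 = N % 2 := PySem.Int.mod_eq_emod_of_pos (by omega)
  by_cases he : N % 2 = 0
  · simp [door_mat_dim, door_mat_dim_alt, he]
  · have hodd : N % 2 = 1 := by omega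
    have hpos : 0 ≤ N := by
      by_contra hneg
      exact hD ⟨by omega, hodd⟩
    obtain ⟨k, hk0, hNk⟩ : ∃ k, 0 ≤ k ∧ N = 2*k+1 := ⟨N / 2, by omega, by omega⟩
    have hfd : PySem.Int.floordiv N 2 = k := by
      rw [PySem.Int.floordiv_eq_ediv_of_pos (by omega)]; omega
    simp only [door_mat_dim, door_mat_dim_alt, hmod, he, beq_iff_eq, if_false, hfd]
    subst hNk
    rw [PySem.List.slice?_none_none_neg_one, Option.getD_some, PySem.List.slice_from_one]
    exact congrArg _ (congrArg _
      (mat_lines (fun i => pyCenter (PySem.List.pyRepeat ".|.".toList (2 * i + 1)) (3 * (2*k+1)) '-')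
        (pyCenter "WELCOME".toList (3 * (2*k+1)) '-') k hk0).symm)

theorem door_mat_dim_changed : Claim_changed_door_mat_dim := by unfold Claim_changed_door_mat_dim; decide

theorem door_mat_dim_tight : Claim_exact_door_mat_dim := by
  intro N _ hDN
  obtain ⟨hneg, hodd⟩ := hDN
  have hmod : PySem.Int.mod N 2 = N % 2 := PySem.Int.mod_eq_emod_of_pos (by omega)
  have hfd : PySem.Int.floordiv N 2 ≤ 0 := by
    rw [PySem.Int.floordiv_eq_ediv_of_pos (by omega)]; omega
  have hA : door_mat_dim N = "WELCOME" := by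
    simp only [door_mat_dim, hmod]
    rw [if_neg (by simp [hodd])]
    rw [PySem.List.pyRange_one_eq_nil hfd]
    simp only [List.map_nil, List.nil_append]
    rw [show pyCenter "WELCOME".toList (3 * N) '-' = "WELCOME".toList by
      unfold pyCenter; rw [if_pos]; simp; omega]
    rw [PySem.List.slice?_none_none_neg_one, Option.getD_some, PySem.List.slice_from_one]
    simp [PySem.Chars.join_singleton]
  have hB : door_mat_dim_alt N = "" := by
    simp only [door_mat_dim_alt, hmod]
    rw [if_neg (by simp [hodd])]
    rw [PySem.List.pyRange_one_eq_nil (by omega)]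
    simp [PySem.Chars.join_nil]
  rw [hA, hB]; decide
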